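-- pv_equiv track=rewrite | github.com/gohannaago/Coding-Exercise | binary.py | solution
-- ===== SOURCE A (Python) =====
-- def solution(A, B):
--     # write your code in Python 3.6
--     C = A * B #C is an integer as well
--     n = C # make a copy for division
--
--     # create empty list to collect binaries
--     bin_array = []
--
--     while n > 0:
--         bin_array.append(n%2) #append either 0 or 1
--         n = n//2 #integer division
--
--     # # join list of strings into single string and convert to integer
--     # binary_num = ''.join([str(num) for num in bin_array])
--     # binary_num = int(binary_num)
--
--     binary_count = sum(bin_array)
--
--     return binary_count
-- ===== SOURCE B (Python) =====
-- def solution(A, B):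
--     # Kernighan's bit-count: clear the lowest set bit once per set bit.
--     n = A * B
--     count = 0
--     while n > 0:
--         n &= n - 1
--         count += 1
--     return count
-- ===== Notes on version B (the rewrite author's own statement) =====
-- stated objective: alternative
-- what changed: Replaces the bit-by-bit division loop that builds a list of remainders and sums it with Brian Kernighan's algorithm, which clears the lowest set bit (n &= n-1) once per set bit while maintaining only a counter.
import Mathlib
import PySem

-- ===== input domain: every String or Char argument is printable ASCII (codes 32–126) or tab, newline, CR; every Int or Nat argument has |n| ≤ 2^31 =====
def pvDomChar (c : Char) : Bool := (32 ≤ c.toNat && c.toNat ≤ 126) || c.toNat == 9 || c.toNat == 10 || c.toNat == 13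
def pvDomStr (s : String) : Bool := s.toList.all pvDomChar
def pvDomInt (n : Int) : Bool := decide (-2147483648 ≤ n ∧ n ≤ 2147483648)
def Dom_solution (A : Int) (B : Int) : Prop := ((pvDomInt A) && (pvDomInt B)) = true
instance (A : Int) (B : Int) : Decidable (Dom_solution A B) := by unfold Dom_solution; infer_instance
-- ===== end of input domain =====

-- B replaces A's divide-and-collect-remainders loop with Kernighan's clear-lowest-set-bit loop; alternative algorithm, same results.


-- ===== PORT A =====
-- the 'while n > 0' loop: append n % 2 to bin_array, halve n
def pvLoopA (n : Int) (binArray : List Int) : List Int :=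
  if 0 < n then
    pvLoopA (PySem.Int.floordiv n 2) (binArray ++ [PySem.Int.mod n 2])
  else binArray
termination_by n.toNat
decreasing_by
  have h2 : PySem.Int.floordiv n 2 = n / 2 := PySem.Int.floordiv_eq_ediv_of_pos (by norm_num)
  rw [h2]; omega

def solution (A : Int) (B : Int) : Int :=
  let C := A * B
  (pvLoopA C []).sum

-- ===== PORT B =====
-- the 'while n > 0' loop: n &= n - 1, count += 1
def pvLoopB (n : Int) (count : Int) : Int :=
  if 0 < n then
    pvLoopB (PySem.Int.band n (n - 1)) (count + 1)
  else count
termination_by n.toNat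
decreasing_by
  have h1 : PySem.Int.band n (n - 1) = ((n.toNat &&& (n - 1).toNat : Nat) : Int) :=
    PySem.Int.band_of_nonneg (by omega) (by omega)
  have h2 : n.toNat &&& (n - 1).toNat ≤ (n - 1).toNat := Nat.and_le_right
  omega

def solution_alt (A : Int) (B : Int) : Int :=
  let n := A * B
  pvLoopB n 0

-- ===== PRECONDITION & SPEC =====
def Spec_solution (A : Int) (B : Int) (out : Int) : Prop := out = solution_alt A B
instance (A : Int) (B : Int) (out : Int) : Decidable (Spec_solution A B out) := by unfold Spec_solution; infer_instance

-- ===== CLAIM (what is proved, stated in full; the proofs are below) =====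
def Claim_equal_solution : Prop := ∀ (A : Int) (B : Int), Dom_solution A B → Spec_solution A B (solution A B)

-- ===== LEMMAS AND PROOFS =====

-- doubling leaves the set-bit count unchanged
theorem bitCount_double (j : Nat) :
    PySem.Int.bitCount ((2 * j : Nat) : Int) = PySem.Int.bitCount (j : Int) := by
  rcases Nat.eq_zero_or_pos j with hj | hj
  · subst hj; decide
  · have h := PySem.Int.bitCount_natCast (m := 2 * j) (by omega)
    have e1 : (2 * j) % 2 = 0 := by omega
    have e2 : (2 * j) / 2 = j := by omega
    rw [e1, e2] at h
    omega

-- odd case of clearing the lowest set bit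
theorem and_pred_odd (k : Nat) : (2 * k + 1) &&& (2 * k) = 2 * k := by
  have h := Nat.bitwise_bit (f := and) (m := k) (a := true) (n := k) (b := false)
  simp [Nat.bit] at h
  have hs : Nat.bitwise and k k = k := by
    have h2 : k &&& k = k := Nat.eq_of_testBit_eq (fun i => by simp)
    simpa [HAnd.hAnd, AndOp.and, Nat.land] using h2
  simpa [HAnd.hAnd, AndOp.and, Nat.land, two_mul, hs] using h

-- even case of clearing the lowest set bit
theorem and_pred_even (k : Nat) (hk : 0 < k) : (2 * k) &&& (2 * k - 1) = 2 * (k &&& (k - 1)) := by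
  have h := Nat.bitwise_bit (f := and) (m := k) (a := false) (n := k - 1) (b := true)
  simp [Nat.bit] at h
  have e : 2 * (k - 1) + 1 = 2 * k - 1 := by omega
  rw [e] at h
  simpa [HAnd.hAnd, AndOp.and, Nat.land, two_mul] using h

-- Kernighan's step on Nat: m &&& (m-1) has one set bit fewer than m
theorem bitCount_and_pred (m : Nat) (hm : 0 < m) :
    PySem.Int.bitCount ((m &&& (m - 1) : Nat) : Int) + 1 = PySem.Int.bitCount (m : Int) := by
  induction m using Nat.strong_induction_on with
  | _ m ih =>
    rcases Nat.even_or_odd m with ⟨k, hk⟩ | ⟨k, hk⟩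
    · -- m = 2k even, k > 0
      have hk0 : 0 < k := by omega
      have hm2 : m = 2 * k := by omega
      subst hm2
      rw [and_pred_even k hk0, bitCount_double, bitCount_double]
      exact ih k (by omega) hk0
    · -- m = 2k + 1 odd
      have hm2 : m = 2 * k + 1 := by omega
      subst hm2
      have e : 2 * k + 1 - 1 = 2 * k := by omega
      rw [e, and_pred_odd, bitCount_double]
      have h := PySem.Int.bitCount_natCast (m := 2 * k + 1) (by omega)
      have e1 : (2 * k + 1) % 2 = 1 := by omega
      have e2 : (2 * k + 1) / 2 = k := by omega
      rw [e1, e2] at h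
      omega

-- A's loop sums the binary digits of n, i.e. computes bitCount
theorem loopA_sum (fuel : Nat) : ∀ (n : Int) (acc : List Int), n.toNat = fuel → 0 ≤ n →
    (pvLoopA n acc).sum = acc.sum + (PySem.Int.bitCount n : Int) := by
  induction fuel using Nat.strong_induction_on with
  | _ fuel ih =>
    intro n acc hf hn
    rw [pvLoopA]
    split
    · rename_i hpos
      have hd : PySem.Int.floordiv n 2 = n / 2 := PySem.Int.floordiv_eq_ediv_of_pos (by norm_num)
      have hrec := ih (n / 2).toNat (by omega) (n / 2) (acc ++ [PySem.Int.mod n 2]) rfl (by omega)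
      rw [hd, hrec, List.sum_append, List.sum_cons, List.sum_nil]
      have hbc := PySem.Int.bitCount_of_pos (n := n) hpos
      have hm : PySem.Int.mod n 2 = n % 2 := PySem.Int.mod_eq_emod_of_pos (by norm_num)
      rw [hbc, hd, hm]
      have : ((PySem.Int.mod n 2).toNat : Int) = n % 2 := by rw [hm]; omega
      omega
    · rename_i hne
      have : n = 0 := by omega
      subst this
      simp

-- B's loop counts how many times the lowest set bit can be cleared, i.e. bitCount
theorem loopB_count (fuel : Nat) : ∀ (n : Int) (c : Int), n.toNat = fuel → 0 ≤ n →
    pvLoopB n c = c + (PySem.Int.bitCount n : Int) := by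
  induction fuel using Nat.strong_induction_on with
  | _ fuel ih =>
    intro n c hf hn
    rw [pvLoopB]
    split
    · rename_i hpos
      have hb : PySem.Int.band n (n - 1) = ((n.toNat &&& (n - 1).toNat : Nat) : Int) :=
        PySem.Int.band_of_nonneg (by omega) (by omega)
      have hle : n.toNat &&& (n - 1).toNat ≤ (n - 1).toNat := Nat.and_le_right
      have hrec := ih (n.toNat &&& (n - 1).toNat) (by omega)
        ((n.toNat &&& (n - 1).toNat : Nat) : Int) (c + 1) (by omega) (by omega)
      rw [hb, hrec]
      have hk := bitCount_and_pred n.toNat (by omega)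
      have e1 : (n.toNat - 1) = (n - 1).toNat := by omega
      rw [e1] at hk
      have e2 : ((n.toNat : Nat) : Int) = n := by omega
      rw [e2] at hk
      omega
    · have : n = 0 := by omega
      subst this
      have hz : PySem.Int.bitCount (0 : Int) = 0 := by decide
      rw [hz]
      simp

-- ===== VERDICT (by name: the statement is the Claim_ definition above) =====
theorem solution_spec : Claim_equal_solution := by
  intro A B _
  unfold Spec_solution solution solution_alt
  show (pvLoopA (A * B) []).sum = pvLoopB (A * B) 0
  by_cases h : 0 < A * B
  · rw [loopA_sum (A * B).toNat (A * B) [] rfl (by omega),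
        loopB_count (A * B).toNat (A * B) 0 rfl (by omega)]
    simp
  · rw [pvLoopA.eq_def, pvLoopB.eq_def]
    simp [h]
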